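-- pv_equiv track=rewrite | github.com/adjudan97onely-cyber/ARME-WARZONE-Script | backend/gpc_generator.py | generate_gpc_data_arrays
-- ===== SOURCE A (Python) =====
-- from typing import List, Dict
--
-- def generate_gpc_data_arrays(weapons: List[Dict]) -> str:
--     """Generate data arrays for weapons"""
--     code = '''
-- // ═══════════════════════════════════════════════════════════════
-- // WEAPON DATA ARRAYS
-- // ═══════════════════════════════════════════════════════════════
--
-- '''
--
--     # Vertical recoil array
--     code += 'int weapon_recoil_v[WEAPON_COUNT] = {\n'
--     code += '    ' + ', '.join([str(w.get('vertical_recoil', 25)) for w in weapons]) + '\n'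
--     code += '};\n\n'
--
--     # Horizontal recoil array
--     code += 'int weapon_recoil_h[WEAPON_COUNT] = {\n'
--     code += '    ' + ', '.join([str(w.get('horizontal_recoil', 10)) for w in weapons]) + '\n'
--     code += '};\n\n'
--
--     # Fire rate array
--     code += 'int weapon_fire_rate[WEAPON_COUNT] = {\n'
--     code += '    ' + ', '.join([str(w.get('fire_rate', 700)) for w in weapons]) + '\n'
--     code += '};\n\n'
--
--     # Rapid fire enable
--     code += 'int weapon_rapid_fire[WEAPON_COUNT] = {\n'
--     code += '    ' + ', '.join(['TRUE' if w.get('rapid_fire', False) else 'FALSE' for w in weapons]) + '\n'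
--     code += '};\n\n'
--
--     return code
-- ===== SOURCE B (Python) =====
-- from typing import List, Dict
--
--
-- def generate_gpc_data_arrays(weapons: List[Dict]) -> str:
--     """Generate data arrays for weapons: one pass over the weapons
--     transposes them into the four formatted columns at once."""
--     vs, hs, fr, rf = [], [], [], []
--     for w in weapons:
--         vs.append(str(w.get('vertical_recoil', 25)))
--         hs.append(str(w.get('horizontal_recoil', 10)))
--         fr.append(str(w.get('fire_rate', 700)))
--         rf.append('TRUE' if w.get('rapid_fire', False) else 'FALSE')
--
--     def block(name, cells):
--         return 'int %s[WEAPON_COUNT] = {\n    %s\n};\n\n' % (name, ', '.join(cells))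
--
--     return ('''
-- // ═══════════════════════════════════════════════════════════════
-- // WEAPON DATA ARRAYS
-- // ═══════════════════════════════════════════════════════════════
--
-- '''
--             + block('weapon_recoil_v', vs)
--             + block('weapon_recoil_h', hs)
--             + block('weapon_fire_rate', fr)
--             + block('weapon_rapid_fire', rf))
-- ===== Notes on version B (the rewrite author's own statement) =====
-- stated objective: alternative
-- what changed: A makes four separate passes over the weapon list, one per output array; B makes a single pass that transposes each weapon into four formatted-column accumulators simultaneously, then assembles the blocks from the columns.
import Mathlib
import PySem

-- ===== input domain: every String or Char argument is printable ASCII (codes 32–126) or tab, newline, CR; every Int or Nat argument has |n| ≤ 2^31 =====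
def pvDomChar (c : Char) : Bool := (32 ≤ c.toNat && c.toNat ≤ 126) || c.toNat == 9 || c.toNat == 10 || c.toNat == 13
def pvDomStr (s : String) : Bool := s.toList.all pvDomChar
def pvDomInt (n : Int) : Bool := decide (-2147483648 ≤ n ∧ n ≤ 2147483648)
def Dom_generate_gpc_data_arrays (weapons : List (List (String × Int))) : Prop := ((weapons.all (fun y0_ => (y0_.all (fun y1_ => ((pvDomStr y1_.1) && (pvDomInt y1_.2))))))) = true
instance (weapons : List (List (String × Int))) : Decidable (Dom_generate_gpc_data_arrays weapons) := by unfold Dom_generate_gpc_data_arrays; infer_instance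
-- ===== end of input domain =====

-- B replaces A's four separate passes over the weapon list with a single pass that
-- transposes each weapon into four formatted-column accumulators at once; objective: alternative, same cost.

-- shared helper: Python's w.get(key, default) on an association list (first match)
def pvDictGetD (w : List (String × Int)) (k : String) (d : Int) : Int :=
  match w.find? (fun p => p.1 == k) with
  | some p => p.2
  | none => d

def pvHeader : String := "
// ═══════════════════════════════════════════════════════════════
// WEAPON DATA ARRAYS
// ═══════════════════════════════════════════════════════════════

"

-- ===== PORT A =====
def generate_gpc_data_arrays (weapons : List (List (String × Int))) : String :=
  let code := pvHeader
  let code := code ++ "int weapon_recoil_v[WEAPON_COUNT] = {\n"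
  let code := code ++ "    " ++ PySem.Str.join ", " (weapons.map (fun w => PySem.Int.toStr (pvDictGetD w "vertical_recoil" 25))) ++ "\n"
  let code := code ++ "};\n\n"
  let code := code ++ "int weapon_recoil_h[WEAPON_COUNT] = {\n"
  let code := code ++ "    " ++ PySem.Str.join ", " (weapons.map (fun w => PySem.Int.toStr (pvDictGetD w "horizontal_recoil" 10))) ++ "\n"
  let code := code ++ "};\n\n"
  let code := code ++ "int weapon_fire_rate[WEAPON_COUNT] = {\n"
  let code := code ++ "    " ++ PySem.Str.join ", " (weapons.map (fun w => PySem.Int.toStr (pvDictGetD w "fire_rate" 700))) ++ "\n"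
  let code := code ++ "};\n\n"
  let code := code ++ "int weapon_rapid_fire[WEAPON_COUNT] = {\n"
  let code := code ++ "    " ++ PySem.Str.join ", " (weapons.map (fun w => if pvDictGetD w "rapid_fire" 0 ≠ 0 then "TRUE" else "FALSE")) ++ "\n"
  let code := code ++ "};\n\n"
  code

-- ===== PORT B =====
-- the loop body of Source B: one weapon extends all four column accumulators
def pvStep (acc : List String × List String × List String × List String)
    (w : List (String × Int)) : List String × List String × List String × List String :=
  (acc.1 ++ [PySem.Int.toStr (pvDictGetD w "vertical_recoil" 25)],
   acc.2.1 ++ [PySem.Int.toStr (pvDictGetD w "horizontal_recoil" 10)],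
   acc.2.2.1 ++ [PySem.Int.toStr (pvDictGetD w "fire_rate" 700)],
   acc.2.2.2 ++ [if pvDictGetD w "rapid_fire" 0 ≠ 0 then "TRUE" else "FALSE"])

-- Source B's block helper
def pvBlock (name : String) (cells : List String) : String :=
  "int " ++ name ++ "[WEAPON_COUNT] = {\n    " ++ PySem.Str.join ", " cells ++ "\n};\n\n"

def generate_gpc_data_arrays_alt (weapons : List (List (String × Int))) : String :=
  let cols := weapons.foldl pvStep ([], [], [], [])
  pvHeader
    ++ pvBlock "weapon_recoil_v" cols.1
    ++ pvBlock "weapon_recoil_h" cols.2.1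
    ++ pvBlock "weapon_fire_rate" cols.2.2.1
    ++ pvBlock "weapon_rapid_fire" cols.2.2.2

-- ===== PRECONDITION & SPEC =====
def Spec_generate_gpc_data_arrays (weapons : List (List (String × Int))) (out : String) : Prop := out = generate_gpc_data_arrays_alt weapons
instance (weapons : List (List (String × Int))) (out : String) : Decidable (Spec_generate_gpc_data_arrays weapons out) := by unfold Spec_generate_gpc_data_arrays; infer_instance

-- ===== CLAIM (what is proved, stated in full; the proofs are below) =====
def Claim_equal_generate_gpc_data_arrays : Prop := ∀ (weapons : List (List (String × Int))), Dom_generate_gpc_data_arrays weapons → Spec_generate_gpc_data_arrays weapons (generate_gpc_data_arrays weapons)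

-- ===== LEMMAS AND PROOFS =====

-- the single transposing pass computes exactly the four per-field map passes
theorem pvFold_eq (weapons : List (List (String × Int)))
    (a b c d : List String) :
    weapons.foldl pvStep (a, b, c, d) =
      (a ++ weapons.map (fun w => PySem.Int.toStr (pvDictGetD w "vertical_recoil" 25)),
       b ++ weapons.map (fun w => PySem.Int.toStr (pvDictGetD w "horizontal_recoil" 10)),
       c ++ weapons.map (fun w => PySem.Int.toStr (pvDictGetD w "fire_rate" 700)),
       d ++ weapons.map (fun w => if pvDictGetD w "rapid_fire" 0 ≠ 0 then "TRUE" else "FALSE")) := by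
  induction weapons generalizing a b c d with
  | nil => simp
  | cons w ws ih => simp [pvStep, ih]

-- ===== VERDICT (by name: the statement is the Claim_ definition above) =====
set_option maxRecDepth 4000 in
theorem generate_gpc_data_arrays_spec : Claim_equal_generate_gpc_data_arrays := by
  intro weapons _
  show _ = _
  simp only [generate_gpc_data_arrays, generate_gpc_data_arrays_alt, pvBlock, pvFold_eq,
    List.nil_append]
  refine String.toList_inj.mp ?_
  simp [String.toList_append, List.append_assoc]
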